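-- pv_equiv track=rewrite | github.com/doanthuan/triagent | src/triagent/agents/therapy/services/rerank/service.py | group_docs
-- ===== SOURCE A (Python) =====
-- from typing import List, Dict, Tuple, Optional, cast
--
-- def group_docs(trials: List[dict], doc_per_group: int) -> List[List[dict]]:
--     num_group = (len(trials) + doc_per_group - 1) // doc_per_group
--     docs_groups = []
--     for i in range(num_group):
--         cur_group = []
--         for j in range(doc_per_group):
--             idx = j * num_group + i
--             if idx < len(trials):
--                 cur_group.append(trials[idx])
--         if cur_group:
--             docs_groups.append(cur_group)
--     return docs_groups
-- ===== SOURCE B (Python) =====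
-- def group_docs(trials, doc_per_group):
--     if doc_per_group <= 0:
--         return []
--     num_group = (len(trials) + doc_per_group - 1) // doc_per_group
--     groups = [[] for _ in range(num_group)]
--     for idx, doc in enumerate(trials):
--         groups[idx % num_group].append(doc)
--     return [g for g in groups if g]
-- ===== Notes on version B (the rewrite author's own statement) =====
-- stated objective: simpler
-- what changed: A fills each group with a nested index loop (j*num_group+i with a bounds test); B makes one enumerate pass dealing trials[idx] to group idx % num_group into pre-allocated buckets, then drops empty buckets.
import Mathlib
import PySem

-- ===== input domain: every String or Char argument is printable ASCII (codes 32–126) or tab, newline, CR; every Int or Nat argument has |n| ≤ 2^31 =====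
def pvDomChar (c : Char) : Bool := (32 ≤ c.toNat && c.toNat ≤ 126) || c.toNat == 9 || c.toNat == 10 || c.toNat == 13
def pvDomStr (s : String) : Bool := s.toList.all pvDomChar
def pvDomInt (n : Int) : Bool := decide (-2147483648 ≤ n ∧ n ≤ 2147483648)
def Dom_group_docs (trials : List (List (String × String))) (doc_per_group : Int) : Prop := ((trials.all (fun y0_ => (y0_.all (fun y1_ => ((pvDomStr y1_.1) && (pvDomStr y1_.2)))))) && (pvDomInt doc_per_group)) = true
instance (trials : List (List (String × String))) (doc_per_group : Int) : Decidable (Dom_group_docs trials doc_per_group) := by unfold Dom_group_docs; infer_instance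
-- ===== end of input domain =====

-- B replaces A's nested index loops by a single pass dealing trials[idx] to group idx % num_group (simpler; same return value).

-- ===== PORT A =====
def group_docs (trials : List (List (String × String))) (doc_per_group : Int) : List (List (List (String × String))) :=
  let num_group : Int := PySem.Int.floordiv ((trials.length : Int) + doc_per_group - 1) doc_per_group
  (PySem.List.pyRange 0 num_group 1).foldl
    (fun docs_groups i =>
      let cur_group := (PySem.List.pyRange 0 doc_per_group 1).foldl
        (fun cur j =>
          let idx := j * num_group + i
          -- whenever the append runs, 0 ≤ idx < len trials (i ≥ 0, j ≥ 0, num_group > 0), so pyGetD is exact for trials[idx]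
          if idx < (trials.length : Int) then cur ++ [PySem.List.pyGetD trials idx []] else cur) []
      if !cur_group.isEmpty then docs_groups ++ [cur_group] else docs_groups) []

-- ===== PORT B =====
def group_docs_alt (trials : List (List (String × String))) (doc_per_group : Int) : List (List (List (String × String))) :=
  if doc_per_group ≤ 0 then []
  else
    let num_group : Int := PySem.Int.floordiv ((trials.length : Int) + doc_per_group - 1) doc_per_group
    let groups0 : List (List (List (String × String))) := List.replicate num_group.toNat []
    let groups := (PySem.List.enumerate trials).foldl
      (fun gs p => gs.modify (PySem.Int.mod p.1 num_group).toNat (fun c => c ++ [p.2])) groups0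
    groups.filter (fun gg => !gg.isEmpty)

-- ===== PRECONDITION & SPEC =====
-- Pre_ excludes exactly doc_per_group = 0, where Python A raises ZeroDivisionError at '//'.
def Pre_group_docs (trials : List (List (String × String))) (doc_per_group : Int) : Prop := doc_per_group ≠ 0
instance (trials : List (List (String × String))) (doc_per_group : Int) : Decidable (Pre_group_docs trials doc_per_group) := by unfold Pre_group_docs; infer_instance
def pvWitness_group_docs : (List (List (String × String))) × Int := ([[("t", "x")], [("t", "y")], [("t", "z")]], 2)

def Spec_group_docs (trials : List (List (String × String))) (doc_per_group : Int) (out : List (List (List (String × String)))) : Prop := out = group_docs_alt trials doc_per_group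
instance (trials : List (List (String × String))) (doc_per_group : Int) (out : List (List (List (String × String)))) : Decidable (Spec_group_docs trials doc_per_group out) := by unfold Spec_group_docs; infer_instance

-- ===== CLAIM (what is proved, stated in full; the proofs are below) =====
def Claim_equal_group_docs : Prop := ∀ (trials : List (List (String × String))) (doc_per_group : Int), Dom_group_docs trials doc_per_group → Pre_group_docs trials doc_per_group → Spec_group_docs trials doc_per_group (group_docs trials doc_per_group)

-- ===== LEMMAS AND PROOFS =====

-- B's dealing loop, read per group: group k collects, in order, the second components of
-- the pairs the loop assigns index k.
theorem deal_getElem? {α : Type} (m : Int × α → Nat) (l : List (Int × α)) (gs : List (List α)) (k : Nat) :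
    (l.foldl (fun acc p => acc.modify (m p) (fun c => c ++ [p.2])) gs)[k]? =
      gs[k]?.map (fun c => c ++ (l.filter (fun p => m p == k)).map (·.2)) := by
  induction l generalizing gs with
  | nil => simp
  | cons p t ih =>
    simp only [List.foldl_cons, ih, List.getElem?_modify, List.filter_cons]
    by_cases h : m p = k
    · simp [h, Option.map_map, Function.comp_def]
    · simp [h, beq_iff_eq]

-- B's dealing loop preserves the number of groups
theorem deal_length {α : Type} (m : Int × α → Nat) (l : List (Int × α)) (gs : List (List α)) :
    (l.foldl (fun acc p => acc.modify (m p) (fun c => c ++ [p.2])) gs).length = gs.length := by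
  induction l generalizing gs with
  | nil => rfl
  | cons p t ih => simp [List.foldl_cons, ih]

-- two strictly increasing integer lists with the same members are equal
theorem eq_of_pairwise_lt_of_mem_iff (l₁ l₂ : List Int) (h₁ : l₁.Pairwise (· < ·))
    (h₂ : l₂.Pairwise (· < ·)) (hm : ∀ x, x ∈ l₁ ↔ x ∈ l₂) : l₁ = l₂ := by
  have n₁ : l₁.Nodup := h₁.imp (fun h => Int.ne_of_lt h)
  have n₂ : l₂.Nodup := h₂.imp (fun h => Int.ne_of_lt h)
  have hp : l₁.Perm l₂ := (List.perm_ext_iff_of_nodup n₁ n₂).mpr hm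
  exact hp.eq_of_pairwise (fun a b _ _ hab hba => by omega) h₁ h₂

-- the indices A's inner loop keeps for group k are exactly the x < N with x % g = k
theorem idx_lists_eq (g d N : Int) (kN : Nat) (hg : 0 < g) (hd : 0 < d)
    (hkg : (kN : Int) < g) (hNd : N ≤ g * d) :
    ((PySem.List.pyRange 0 d 1).filter (fun j => decide (j * g + (kN : Int) < N))).map (fun j => j * g + (kN : Int))
      = (PySem.List.pyRange 0 N 1).filter (fun x => (PySem.Int.mod x g).toNat == kN) := by
  apply eq_of_pairwise_lt_of_mem_iff
  · rw [List.pairwise_map]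
    exact (PySem.List.pairwise_lt_pyRange_one 0 d).filter _ |>.imp
      (fun h => by nlinarith)
  · exact (PySem.List.pairwise_lt_pyRange_one 0 N).filter _
  · intro x
    simp only [List.mem_map, List.mem_filter, PySem.List.mem_pyRange_one, decide_eq_true_eq,
      beq_iff_eq]
    constructor
    · rintro ⟨j, ⟨⟨hj0, hjd⟩, hlt⟩, rfl⟩
      have hm : PySem.Int.mod (j * g + (kN : Int)) g = (kN : Int) := by
        rw [PySem.Int.mod_eq_emod_of_pos hg]
        have : (j * g + (kN : Int)) % g = (kN : Int) % g := by
          rw [add_comm, mul_comm]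
          exact Int.add_mul_emod_self_left (kN : Int) g j
        rw [this, Int.emod_eq_of_lt (by positivity) hkg]
      refine ⟨⟨by positivity, hlt⟩, ?_⟩
      rw [hm]; omega
    · rintro ⟨⟨hx0, hxN⟩, hmod⟩
      have hmm : PySem.Int.mod x g = (kN : Int) := by
        have := PySem.Int.mod_nonneg x hg
        omega
      rw [PySem.Int.mod_eq_emod_of_pos hg] at hmm
      have hde : x % g + g * (x / g) = x := Int.emod_add_mul_ediv x g
      have hcm : x / g * g = g * (x / g) := mul_comm _ _
      have hdg : g * d = d * g := mul_comm _ _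
      refine ⟨x / g, ⟨⟨Int.ediv_nonneg hx0 (le_of_lt hg), ?_⟩, ?_⟩, ?_⟩
      · rw [Int.ediv_lt_iff_lt_mul hg]
        omega
      · omega
      · omega

-- the two loop nests agree for ANY group count g with 0 ≤ g, len ≤ g*d and every group index below len
theorem core (trials : List (List (String × String))) (d g : Int) (hpos : 0 < d) (hg0 : 0 ≤ g)
    (hgN : (trials.length : Int) ≤ g * d)
    (hup : ∀ k : Int, 0 ≤ k → k < g → k < (trials.length : Int)) :
    (PySem.List.pyRange 0 g 1).foldl
      (fun docs_groups i =>
        let cur_group := (PySem.List.pyRange 0 d 1).foldl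
          (fun cur j =>
            let idx := j * g + i
            if idx < (trials.length : Int) then cur ++ [PySem.List.pyGetD trials idx []] else cur) []
        if !cur_group.isEmpty then docs_groups ++ [cur_group] else docs_groups) []
    = ((PySem.List.enumerate trials).foldl
        (fun gs p => gs.modify (PySem.Int.mod p.1 g).toNat (fun c => c ++ [p.2]))
        (List.replicate g.toNat [])).filter (fun gg => !gg.isEmpty) := by
  set curF : Int → List (List (String × String)) := fun i =>
    ((PySem.List.pyRange 0 d 1).filter (fun j => decide (j * g + i < (trials.length : Int)))).map
      (fun j => PySem.List.pyGetD trials (j * g + i) []) with hcurF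
  have hinner : ∀ i : Int,
      (PySem.List.pyRange 0 d 1).foldl
        (fun cur j =>
          let idx := j * g + i
          if idx < (trials.length : Int) then cur ++ [PySem.List.pyGetD trials idx []] else cur) []
      = curF i := by
    intro i
    simpa using PySem.List.foldl_append_ite
      (fun j => j * g + i < (trials.length : Int))
      (fun j => PySem.List.pyGetD trials (j * g + i) []) (PySem.List.pyRange 0 d 1) []
  have hne : ∀ i : Int, 0 ≤ i → i < g → (!(curF i).isEmpty) = true := by
    intro i h0 hig
    have hmem : (0:Int) ∈ (PySem.List.pyRange 0 d 1).filter
        (fun j => decide (j * g + i < (trials.length : Int))) := by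
      rw [List.mem_filter]
      refine ⟨PySem.List.mem_pyRange_one.mpr ⟨le_refl 0, hpos⟩, ?_⟩
      simpa using hup i h0 hig
    have hnil : curF i ≠ [] := by
      rw [hcurF]
      intro hnil
      rw [List.map_eq_nil_iff] at hnil
      rw [hnil] at hmem
      exact absurd hmem (List.not_mem_nil)
    simp [hnil]
  have hA : (PySem.List.pyRange 0 g 1).foldl
      (fun docs_groups i =>
        let cur_group := (PySem.List.pyRange 0 d 1).foldl
          (fun cur j =>
            let idx := j * g + i
            if idx < (trials.length : Int) then cur ++ [PySem.List.pyGetD trials idx []] else cur) []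
        if !cur_group.isEmpty then docs_groups ++ [cur_group] else docs_groups) []
      = (PySem.List.pyRange 0 g 1).map curF := by
    have e1 : (PySem.List.pyRange 0 g 1).foldl
          (fun docs_groups i =>
            let cur_group := (PySem.List.pyRange 0 d 1).foldl
              (fun cur j =>
                let idx := j * g + i
                if idx < (trials.length : Int) then cur ++ [PySem.List.pyGetD trials idx []] else cur) []
            if !cur_group.isEmpty then docs_groups ++ [cur_group] else docs_groups) []
        = (PySem.List.pyRange 0 g 1).foldl
            (fun docs_groups i => if !(curF i).isEmpty then docs_groups ++ [curF i] else docs_groups) [] := by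
      apply PySem.List.foldl_congr_mem
      intro acc' i _
      simp only [hinner i]
    rw [e1, PySem.List.foldl_append_if (p := fun i => !(curF i).isEmpty) (f := curF)]
    rw [List.filter_eq_self.mpr]
    · rfl
    · intro i hi
      obtain ⟨h0, hig⟩ := PySem.List.mem_pyRange_one.mp hi
      exact hne i h0 hig
  rw [hA]
  set dealt := (PySem.List.enumerate trials).foldl
      (fun gs p => gs.modify (PySem.Int.mod p.1 g).toNat (fun c => c ++ [p.2]))
      (List.replicate g.toNat ([] : List (List (String × String)))) with hdealt
  have hcol : ∀ k : Nat, k < g.toNat → dealt[k]? = some (curF (k : Int)) := by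
    intro k hk
    have hkg : (k : Int) < g := by omega
    have hgpos : 0 < g := by omega
    rw [hdealt, deal_getElem?]
    rw [List.getElem?_replicate, if_pos hk]
    simp only [Option.map_some]
    congr 1
    rw [PySem.List.enumerate_eq_map_pyRange trials ([] : List (String × String))]
    rw [List.filter_map, List.map_map]
    rw [PySem.List.len_eq trials]
    have hidx := idx_lists_eq g d (trials.length : Int) k hgpos hpos hkg hgN
    rw [hcurF]
    calc ([] : List (List (String × String))) ++
          ((PySem.List.pyRange 0 (trials.length : Int) 1).filter
            (((fun p => (PySem.Int.mod p.1 g).toNat == k)) ∘ (fun j => (j, PySem.List.pyGetD trials j [])))).map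
            ((fun (p : Int × List (String × String)) => p.2) ∘ (fun j => (j, PySem.List.pyGetD trials j [])))
        = ((PySem.List.pyRange 0 (trials.length : Int) 1).filter
            (fun x => (PySem.Int.mod x g).toNat == k)).map (fun j => PySem.List.pyGetD trials j []) := by
          simp [Function.comp_def]
      _ = (((PySem.List.pyRange 0 d 1).filter
              (fun j => decide (j * g + (k : Int) < (trials.length : Int)))).map
              (fun j => j * g + (k : Int))).map (fun x => PySem.List.pyGetD trials x []) := by
          rw [hidx]
      _ = ((PySem.List.pyRange 0 d 1).filter
            (fun j => decide (j * g + (k : Int) < (trials.length : Int)))).map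
            (fun j => PySem.List.pyGetD trials (j * g + (k : Int)) []) := by
          rw [List.map_map]; rfl
  have hdlen : dealt.length = g.toNat := by
    rw [hdealt, deal_length, List.length_replicate]
  have hdeq : dealt = (PySem.List.pyRange 0 g 1).map curF := by
    apply List.ext_getElem?
    intro k
    rw [List.getElem?_map, PySem.List.getElem?_pyRange_one]
    by_cases hk : k < g.toNat
    · rw [hcol k hk, if_pos (by omega)]
      simp
    · rw [if_neg (by omega), List.getElem?_eq_none (by omega)]
      rfl
  rw [hdeq, List.filter_eq_self.mpr]
  intro gg hgg
  rw [List.mem_map] at hgg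
  obtain ⟨i, hi, rfl⟩ := hgg
  obtain ⟨h0, hig⟩ := PySem.List.mem_pyRange_one.mp hi
  exact hne i h0 hig

theorem main_eq (trials : List (List (String × String))) (d : Int) :
    d ≠ 0 → group_docs trials d = group_docs_alt trials d := by
  intro _
  by_cases hle : d ≤ 0
  · rw [group_docs, group_docs_alt, if_pos hle]
    have hnil : PySem.List.pyRange 0 d 1 = [] := PySem.List.pyRange_one_eq_nil hle
    simp only [hnil, List.foldl_nil]
    simp
  · have hlt : 0 < d := by omega
    rw [group_docs, group_docs_alt, if_neg (by omega)]
    have hg0 : 0 ≤ PySem.Int.floordiv ((trials.length : Int) + d - 1) d := by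
      obtain ⟨h1, h2⟩ := (PySem.Int.floordiv_eq_iff_of_pos (a := (trials.length : Int) + d - 1) hlt).mp rfl
      set q := PySem.Int.floordiv ((trials.length : Int) + d - 1) d with hq
      have hexp : (q + 1) * d = q * d + d := by ring
      have hN0 : (0:Int) ≤ (trials.length : Int) := Int.natCast_nonneg _
      nlinarith
    obtain ⟨h1, h2⟩ := (PySem.Int.floordiv_eq_iff_of_pos (a := (trials.length : Int) + d - 1) hlt).mp rfl
    set q := PySem.Int.floordiv ((trials.length : Int) + d - 1) d with hq
    have hexp : (q + 1) * d = q * d + d := by ring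
    apply core trials d q hlt hg0 (by omega)
    intro k hk0 hkq
    nlinarith

-- ===== VERDICT (by name: the statement is the Claim_ definition above) =====
theorem group_docs_spec : Claim_equal_group_docs := by
  intro trials d _ hpre
  unfold Spec_group_docs
  exact main_eq trials d hpre
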